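-- pv_equiv track=rewrite | github.com/Suns-group/SD-MRS-LF | Simulator.py | back_and_forth
-- ===== SOURCE A (Python) =====
-- def back_and_forth(n, m):
--     k = 0
--     p = 0
--     solution = []
--     for j in range(n):
--         for i in range(m):
--             if j%2 == 0:
--                 p = (i*n) + j + 1
--             else:
--                 p = (m-i-1)*n + j + 1
--             solution.append(p)
--             k = k + 1
--     return solution
-- ===== SOURCE B (Python) =====
-- def back_and_forth(n, m):
--     if n <= 0 or m <= 0:
--         return []
--     table = [range(i * n + 1, (i + 1) * n + 1) for i in range(m)]
--     out = []
--     for j, col in enumerate(zip(*table)):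
--         out.extend(col if j % 2 == 0 else col[::-1])
--     return out
-- ===== Notes on version B (the rewrite author's own statement) =====
-- stated objective: alternative
-- what changed: B first materializes the m x n row-major table of 1..n*m (each row a contiguous range) and then reads it column-wise with a snake traversal via zip, reversing odd columns, instead of computing each flat element with an inner parity branch.
import Mathlib
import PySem

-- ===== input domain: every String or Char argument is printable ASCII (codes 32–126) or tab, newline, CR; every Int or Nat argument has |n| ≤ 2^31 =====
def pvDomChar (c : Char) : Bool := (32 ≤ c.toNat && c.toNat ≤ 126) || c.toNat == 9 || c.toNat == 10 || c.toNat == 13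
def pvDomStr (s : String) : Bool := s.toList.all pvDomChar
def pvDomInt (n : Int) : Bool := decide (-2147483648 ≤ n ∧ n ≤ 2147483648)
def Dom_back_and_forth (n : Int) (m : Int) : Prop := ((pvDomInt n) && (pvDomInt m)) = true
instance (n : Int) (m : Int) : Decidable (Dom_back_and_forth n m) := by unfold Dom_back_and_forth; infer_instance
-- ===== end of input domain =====

-- B materializes the m×n row-major table of 1..n*m (rows as ranges) and reads it with a
-- column-wise snake traversal via zip (odd columns reversed), instead of A's per-element parity formula.

-- ===== PORT A =====
-- state (k, solution); p is assigned before use in every iteration, so it is a local let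
def back_and_forth (n : Int) (m : Int) : List Int :=
  ((PySem.List.pyRange 0 n 1).foldl (fun (st : Int × List Int) j =>
    (PySem.List.pyRange 0 m 1).foldl (fun (st : Int × List Int) i =>
      let p : Int := if PySem.Int.mod j 2 = 0 then i * n + j + 1 else (m - i - 1) * n + j + 1
      (st.1 + 1, st.2 ++ [p])) st) ((0 : Int), ([] : List Int))).2

-- ===== PORT B =====
-- zip(*rows): ported by its specification — min row length many columns, column j is the
-- j-th element of every row (the default 0 is never read: j is below every row's length);
-- exact for zip of lists, including zip() = [] for no rows.
def pvZipStar (rows : List (List Int)) : List (List Int) :=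
  match rows with
  | [] => []
  | r0 :: rest =>
    let k := rest.foldl (fun acc r => min acc r.length) r0.length
    (List.range k).map (fun j => (r0 :: rest).map (fun r => r.getD j 0))

-- row i is range(i*n+1, (i+1)*n+1); col[::-1] is List.reverse (PySem.List.slice?_none_none_neg_one)
def back_and_forth_alt (n : Int) (m : Int) : List Int :=
  if n ≤ 0 ∨ m ≤ 0 then [] else
  let table := (PySem.List.pyRange 0 m 1).map (fun i =>
    PySem.List.pyRange (i * n + 1) ((i + 1) * n + 1) 1)
  (PySem.List.enumerate (pvZipStar table) 0).foldl (fun out jc =>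
    out ++ (if PySem.Int.mod jc.1 2 = 0 then jc.2 else jc.2.reverse)) []

-- ===== PRECONDITION & SPEC =====
def Spec_back_and_forth (n : Int) (m : Int) (out : List Int) : Prop := out = back_and_forth_alt n m
instance (n : Int) (m : Int) (out : List Int) : Decidable (Spec_back_and_forth n m out) := by unfold Spec_back_and_forth; infer_instance

-- ===== CLAIM (what is proved, stated in full; the proofs are below) =====
def Claim_equal_back_and_forth : Prop := ∀ (n : Int) (m : Int), Dom_back_and_forth n m → Spec_back_and_forth n m (back_and_forth n m)

-- ===== LEMMAS AND PROOFS =====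

-- A's inner loop: the pair-state fold appends the mapped list and counts steps
lemma bf_inner (g : Int → Int) (is : List Int) :
    ∀ (st : Int × List Int),
      is.foldl (fun (st : Int × List Int) i => (st.1 + 1, st.2 ++ [g i])) st
        = (st.1 + is.length, st.2 ++ is.map g) := by
  induction is with
  | nil => intro st; simp
  | cons a as ih =>
    intro st
    simp only [List.foldl_cons, List.length_cons, List.map_cons, ih]
    refine Prod.ext ?_ ?_
    · push_cast; ring
    · simp

-- A's whole loop nest is a column-wise flatMap
lemma bf_A_flat (n m : Int) :
    back_and_forth n m
      = (PySem.List.pyRange 0 n 1).flatMap (fun j =>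
          (PySem.List.pyRange 0 m 1).map (fun i =>
            if PySem.Int.mod j 2 = 0 then i * n + j + 1 else (m - i - 1) * n + j + 1)) := by
  unfold back_and_forth
  suffices h : ∀ (js : List Int) (st : Int × List Int),
      (js.foldl (fun (st : Int × List Int) j =>
        (PySem.List.pyRange 0 m 1).foldl (fun (st : Int × List Int) i =>
          let p : Int := if PySem.Int.mod j 2 = 0 then i * n + j + 1 else (m - i - 1) * n + j + 1
          (st.1 + 1, st.2 ++ [p])) st) st).2
      = st.2 ++ js.flatMap (fun j => (PySem.List.pyRange 0 m 1).map (fun i =>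
          if PySem.Int.mod j 2 = 0 then i * n + j + 1 else (m - i - 1) * n + j + 1)) by
    simpa using h (PySem.List.pyRange 0 n 1) ((0 : Int), ([] : List Int))
  intro js
  induction js with
  | nil => intro st; simp
  | cons j js ih =>
    intro st
    simp only [List.foldl_cons, List.flatMap_cons]
    rw [bf_inner, ih]
    simp

-- folding min over rows of one common length never moves off that length
lemma bf_foldl_min_const (c : Nat) :
    ∀ (rs : List (List Int)), (∀ r ∈ rs, r.length = c) →
      rs.foldl (fun acc r => min acc r.length) c = c := by
  intro rs
  induction rs with
  | nil => intro _; simp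
  | cons r rs ih =>
    intro h
    have hr : r.length = c := h r (by simp)
    simp only [List.foldl_cons, hr, min_self]
    exact ih (fun r' hr' => h r' (by simp [hr']))

-- every row of B's table has length n.toNat
lemma bf_row_length (n m : Int) (r : List Int)
    (hr : r ∈ (PySem.List.pyRange 0 m 1).map (fun i =>
      PySem.List.pyRange (i * n + 1) ((i + 1) * n + 1) 1)) :
    r.length = n.toNat := by
  obtain ⟨i, _, rfl⟩ := List.mem_map.1 hr
  rw [PySem.List.length_pyRange_one]
  congr 1
  ring

-- the j-th entry of row i is i*n+1+j
lemma bf_row_getD (n : Int) (i : Int) (j : Nat) (hj : j < n.toNat) :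
    (PySem.List.pyRange (i * n + 1) ((i + 1) * n + 1) 1).getD j 0 = i * n + 1 + j := by
  rw [PySem.List.pyRange_one]
  have hb : ((i + 1) * n + 1 - (i * n + 1)).toNat = n.toNat := by
    congr 1; ring
  rw [hb, PySem.List.getD_map_range _ _ _ _ hj]

-- zip(*table) is the list of columns, j = 0 .. n-1
lemma bf_zipStar (n m : Int) (hm : 0 < m) :
    pvZipStar ((PySem.List.pyRange 0 m 1).map (fun i =>
        PySem.List.pyRange (i * n + 1) ((i + 1) * n + 1) 1))
      = (List.range n.toNat).map (fun j : Nat =>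
          (PySem.List.pyRange 0 m 1).map (fun i => i * n + 1 + (j : Int))) := by
  set table := (PySem.List.pyRange 0 m 1).map (fun i =>
    PySem.List.pyRange (i * n + 1) ((i + 1) * n + 1) 1) with htable
  obtain ⟨r0, rest, hsplit⟩ : ∃ r0 rest, table = r0 :: rest := by
    refine List.exists_cons_of_ne_nil ?_
    rw [htable, PySem.List.pyRange_one_cons (by omega)]
    simp
  have hlen : ∀ r ∈ table, r.length = n.toNat := fun r hr => bf_row_length n m r hr
  have hr0 : r0.length = n.toNat := hlen r0 (by rw [hsplit]; simp)
  have hrest : ∀ r ∈ rest, r.length = n.toNat := fun r hr => hlen r (by rw [hsplit]; simp [hr])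
  unfold pvZipStar
  rw [hsplit]
  simp only []
  rw [hr0, bf_foldl_min_const n.toNat rest hrest, ← hsplit]
  refine List.map_congr_left (fun j hj => ?_)
  have hjlt : j < n.toNat := List.mem_range.1 hj
  rw [htable, List.map_map]
  refine List.map_congr_left (fun i _ => ?_)
  simp only [Function.comp]
  exact bf_row_getD n i j hjlt

-- ===== VERDICT (by name: the statement is the Claim_ definition above) =====
theorem back_and_forth_spec : Claim_equal_back_and_forth := by
  intro n m _
  unfold Spec_back_and_forth
  rw [bf_A_flat]
  unfold back_and_forth_alt
  by_cases h : n ≤ 0 ∨ m ≤ 0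
  · rw [if_pos h]
    rcases h with h | h
    · rw [PySem.List.pyRange_one_eq_nil (a := (0:Int)) (b := n) (by omega)]; simp
    · rw [PySem.List.pyRange_one_eq_nil (a := (0:Int)) (b := m) (by omega)]
      simp [List.flatMap]
  · have hn : 0 < n := by omega
    have hm : 0 < m := by omega
    rw [if_neg (by omega)]
    simp only []
    rw [bf_zipStar n m hm]
    rw [PySem.List.enumerate_eq_map_pyRange _ ([] : List Int)]
    rw [PySem.List.foldl_append_eq_flatMap, List.flatMap_map]
    simp only [List.nil_append, PySem.List.len_eq, List.length_map, List.length_range]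
    have hcast : ((n.toNat : Int)) = n := Int.toNat_of_nonneg (by omega)
    rw [hcast]
    refine (List.flatMap_congr (fun j hj => ?_)).symm
    obtain ⟨hj0, hjn⟩ := (PySem.List.mem_pyRange_one).1 hj
    have hjlt : j.toNat < n.toNat := by omega
    have hget : PySem.List.pyGetD ((List.range n.toNat).map (fun j' : Nat =>
        (PySem.List.pyRange 0 m 1).map (fun i => i * n + 1 + (j' : Int)))) j [] 
        = (PySem.List.pyRange 0 m 1).map (fun i => i * n + 1 + j) := by
      rw [PySem.List.pyGetD_eq_getElem _ _ hj0 (by simp [List.length_range]; omega)]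
      simp only [List.getElem_map, List.getElem_range]
      rw [Int.toNat_of_nonneg hj0]
    rw [hget]
    by_cases hpar : PySem.Int.mod j 2 = 0
    · simp only [hpar, if_true]
      refine List.map_congr_left (fun i _ => ?_)
      ring
    · simp only [hpar, if_false]
      rw [← List.map_reverse]
      have hrev : (PySem.List.pyRange 0 m 1).reverse = PySem.List.pyRange (m - 1) (-1) (-1) := by
        rw [PySem.List.pyRange_neg_one_eq_reverse]; norm_num
      rw [hrev, PySem.List.pyRange_neg_one, PySem.List.pyRange_one, List.map_map, List.map_map]
      have ht : (m - 1 - -1).toNat = (m - 0).toNat := by omega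
      rw [ht]
      refine List.map_congr_left (fun k _ => ?_)
      simp only [Function.comp]
      ring
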